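-- pv_equiv track=rewrite | github.com/mihokrusic/adventOfCode2022 | solutions/day03.py | part2
-- ===== SOURCE A (Python) =====
-- def part2(input):
--     priority = 0
--     for count, _ in enumerate(input):
--         if (count + 1) % 3 != 0:
--             continue
--
--         first = set(list(input[count - 2].rstrip()))
--         second = set(list(input[count - 1].rstrip()))
--         third = set(list(input[count].rstrip()))
--         intersection = first.intersection(second).intersection(third)
--         for e in intersection:
--             priority += __calc_priority(e)
--
--     return priority
--
-- def __calc_priority(c):
--     if 65 <= ord(c) <= 90:
--         return ord(c) - 38
--     elif 97 <= ord(c) <= 122: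
--         return ord(c) - 96
--     return 0
-- ===== SOURCE B (Python) =====
-- def part2(input):
--     total = 0
--     for i in range(2, len(input), 3):
--         counts = {}
--         for line in input[i - 2:i + 1]:
--             for c in set(line.rstrip()):
--                 counts[c] = counts.get(c, 0) + 1
--         for c, n in counts.items():
--             if n == 3:
--                 total += __calc_priority(c)
--     return total
--
--
-- def __calc_priority(c):
--     if 65 <= ord(c) <= 90:
--         return ord(c) - 38
--     elif 97 <= ord(c) <= 122:
--         return ord(c) - 96
--     return 0
-- ===== Notes on version B (the rewrite author's own statement) =====
-- stated objective: alternative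
-- what changed: B replaces A's chained set intersections per line-triple with a single frequency table built from the three deduplicated lines, summing priorities of characters counted exactly three times, and iterates groups directly with range(2, len, 3) instead of enumerate with a modulo test.
import Mathlib
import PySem

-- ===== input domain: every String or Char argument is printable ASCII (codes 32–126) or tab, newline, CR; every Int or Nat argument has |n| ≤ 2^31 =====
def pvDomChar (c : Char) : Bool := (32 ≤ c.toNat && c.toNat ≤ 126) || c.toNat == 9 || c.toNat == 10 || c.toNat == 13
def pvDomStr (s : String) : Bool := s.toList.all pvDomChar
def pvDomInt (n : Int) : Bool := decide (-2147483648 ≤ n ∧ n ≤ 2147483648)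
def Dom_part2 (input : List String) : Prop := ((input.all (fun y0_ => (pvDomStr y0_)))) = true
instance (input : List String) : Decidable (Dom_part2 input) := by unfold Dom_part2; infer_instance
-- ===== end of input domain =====

-- B replaces A's chained set intersections by one per-triple frequency table over the
-- deduplicated lines, summing priorities of characters counted three times (objective: alternative).

-- ===== PORT A =====
-- __calc_priority (shared verbatim by both Pythons)
def pvCalcPriority (c : Char) : Int :=
  if 65 ≤ c.toNat ∧ c.toNat ≤ 90 then (c.toNat : Int) - 38
  else if 97 ≤ c.toNat ∧ c.toNat ≤ 122 then (c.toNat : Int) - 96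
  else 0

-- loop body of A's 'for count, _ in enumerate(input)'
def pvABody (input : List String) (priority : Int) (ce : Int × String) : Int :=
  let count := ce.1
  if PySem.Int.mod (count + 1) 3 ≠ 0 then priority
  else
    let first := PySem.Set.ofList (PySem.Str.rstrip (PySem.List.pyGetD input (count - 2) "")).toList
    let second := PySem.Set.ofList (PySem.Str.rstrip (PySem.List.pyGetD input (count - 1) "")).toList
    let third := PySem.Set.ofList (PySem.Str.rstrip (PySem.List.pyGetD input count "")).toList
    let inter := PySem.Set.inter (PySem.Set.inter first second) third
    inter.foldl (fun p e => p + pvCalcPriority e) priority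

def part2 (input : List String) : Int :=
  (PySem.List.enumerate input 0).foldl (pvABody input) 0

-- ===== PORT B =====
-- loop body of B's 'for i in range(2, len(input), 3)'
def pvBBody (input : List String) (total : Int) (i : Int) : Int :=
  let counts : PySem.Dict Char Int :=
    (PySem.List.slice input (some (i - 2)) (some (i + 1))).foldl
      (fun d line =>
        (PySem.Set.ofList (PySem.Str.rstrip line).toList).foldl
          (fun d c => d.insert c (d.getD c 0 + 1)) d)
      PySem.Dict.empty
  counts.items.foldl (fun t kv => if kv.2 == 3 then t + pvCalcPriority kv.1 else t) total

def part2_alt (input : List String) : Int :=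
  (PySem.List.pyRange 2 (input.length : Int) 3).foldl (pvBBody input) 0

-- ===== PRECONDITION & SPEC =====
def Spec_part2 (input : List String) (out : Int) : Prop := out = part2_alt input
instance (input : List String) (out : Int) : Decidable (Spec_part2 input out) := by unfold Spec_part2; infer_instance

-- ===== CLAIM (what is proved, stated in full; the proofs are below) =====
def Claim_equal_part2 : Prop := ∀ (input : List String), Dom_part2 input → Spec_part2 input (part2 input)

-- ===== LEMMAS AND PROOFS =====

-- the deduplicated characters of line number i (both programs build exactly this set)
def pvSetAt (input : List String) (i : Nat) : PySem.Set Char :=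
  PySem.Set.ofList (PySem.Chars.rstrip (input.getD i "").toList)

-- A's per-triple contribution (group k covers lines 3k, 3k+1, 3k+2)
def pvGrp (input : List String) (k : Nat) : Int :=
  ((PySem.Set.inter (PySem.Set.inter (pvSetAt input (3 * k)) (pvSetAt input (3 * k + 1)))
      (pvSetAt input (3 * k + 2))).map pvCalcPriority).sum

-- filtering an updated set by a predicate that forces membership in the base set ignores the update
theorem pv_filter_update {α : Type} [BEq α] [LawfulBEq α] (p : α → Bool) (xs : List α)
    (s : PySem.Set α) (h : ∀ c, p c = true → c ∈ s) :
    (PySem.Set.update s xs).filter p = s.filter p := by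
  induction xs generalizing s with
  | nil => rfl
  | cons x t ih =>
      simp only [PySem.Set.update, List.foldl_cons] at *
      have hmem : ∀ c, p c = true → c ∈ PySem.Set.add s x := by
        intro c hc
        unfold PySem.Set.add
        split
        · exact h c hc
        · exact List.mem_append_left _ (h c hc)
      rw [ih _ hmem]
      unfold PySem.Set.add
      by_cases hx : x ∈ s
      · simp [hx]
      · have hpx : p x = false := Bool.eq_false_iff.mpr fun hh => hx (h x hh)
        simp [hx, List.filter_append, hpx]

-- the core per-triple fact: characters counted 3 times in the concatenation of three
-- duplicate-free lists are exactly A's chained intersection, in the same order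
theorem pv_core {α : Type} [BEq α] [LawfulBEq α] (s1 s2 s3 : List α)
    (h1 : s1.Nodup) (h2 : s2.Nodup) (h3 : s3.Nodup) :
    (PySem.Set.ofList (s1 ++ (s2 ++ s3))).filter
        (fun c => (s1 ++ (s2 ++ s3)).count c == 3) =
      PySem.Set.inter (PySem.Set.inter s1 s2) s3 := by
  have hp : ∀ c, ((s1 ++ (s2 ++ s3)).count c == 3) = true ↔ (c ∈ s1 ∧ c ∈ s2 ∧ c ∈ s3) := by
    intro c
    have e1 := @List.nodup_iff_count_le_one _ _ _ s1 |>.mp h1 c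
    have e2 := @List.nodup_iff_count_le_one _ _ _ s2 |>.mp h2 c
    have e3 := @List.nodup_iff_count_le_one _ _ _ s3 |>.mp h3 c
    have m1 := @List.count_pos_iff _ _ _ c s1
    have m2 := @List.count_pos_iff _ _ _ c s2
    have m3 := @List.count_pos_iff _ _ _ c s3
    simp only [List.count_append, beq_iff_eq]
    constructor
    · intro h
      refine ⟨m1.mp ?_, m2.mp ?_, m3.mp ?_⟩ <;> omega
    · rintro ⟨a1, a2, a3⟩
      have := m1.mpr a1; have := m2.mpr a2; have := m3.mpr a3
      omega
  rw [PySem.Set.ofList_append, PySem.Set.ofList_eq_self_of_nodup s1 h1]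
  rw [pv_filter_update _ _ _ (fun c hc => ((hp c).mp hc).1)]
  have hinter : PySem.Set.inter (PySem.Set.inter s1 s2) s3 =
      s1.filter (fun c => s3.contains c && s2.contains c) := by
    simp [PySem.Set.inter, List.filter_filter]
  rw [hinter]
  refine List.filter_congr ?_
  intro c hc
  have c1 := List.count_eq_one_of_mem h1 hc
  by_cases a2 : c ∈ s2 <;> by_cases a3 : c ∈ s3
  · simp [c1, List.count_eq_one_of_mem h2 a2, List.count_eq_one_of_mem h3 a3, a2, a3]
  · simp [c1, List.count_eq_one_of_mem h2 a2, List.count_eq_zero_of_not_mem a3, a2, a3]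
  · simp [c1, List.count_eq_zero_of_not_mem a2, List.count_eq_one_of_mem h3 a3, a2, a3]
  · simp [c1, List.count_eq_zero_of_not_mem a2, List.count_eq_zero_of_not_mem a3, a2, a3]

-- A's per-index contribution, as the port computes it (Int index)
def pvGA (input : List String) (i : Int) : Int :=
  if PySem.Int.mod (i + 1) 3 ≠ 0 then 0
  else
    ((PySem.Set.inter (PySem.Set.inter
        (PySem.Set.ofList (PySem.Str.rstrip (PySem.List.pyGetD input (i - 2) "")).toList)
        (PySem.Set.ofList (PySem.Str.rstrip (PySem.List.pyGetD input (i - 1) "")).toList))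
        (PySem.Set.ofList (PySem.Str.rstrip (PySem.List.pyGetD input i "")).toList)).map
      pvCalcPriority).sum

theorem pv_ABody_eq (input : List String) (acc : Int) (ce : Int × String) :
    pvABody input acc ce = acc + pvGA input ce.1 := by
  simp only [pvABody, pvGA]
  split_ifs with h
  · simp
  · rw [PySem.List.foldl_add]

-- A as a sum of per-triple contributions
theorem pv_A_eq (input : List String) :
    part2 input =
      ((List.range input.length).map
        (fun j => if (j + 1) % 3 = 0 then pvGrp input ((j - 2) / 3) else 0)).sum := by
  unfold part2
  rw [show pvABody input = (fun acc ce => acc + pvGA input ce.1) from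
        funext fun a => funext fun ce => pv_ABody_eq input a ce,
     PySem.List.foldl_add, zero_add]
  have h1 : (PySem.List.enumerate input 0).map (fun ce => pvGA input ce.1)
      = ((PySem.List.enumerate input 0).map (fun x => x.1)).map (pvGA input) := by
    simp [List.map_map, Function.comp]
  rw [h1, PySem.List.map_fst_enumerate, zero_add, PySem.List.pyRange_zero_natCast,
     List.map_map]
  refine congrArg List.sum (List.map_congr_left ?_)
  intro j hj
  rw [List.mem_range] at hj
  have hm : PySem.Int.mod ((j : Int) + 1) 3 = (((j + 1) % 3 : Nat) : Int) := by
    exact_mod_cast PySem.Int.mod_natCast (j + 1) 3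
  simp only [Function.comp, pvGA]
  by_cases h3 : (j + 1) % 3 = 0
  · rw [if_neg (by simp; omega), if_pos h3]
    have e2 : ((j : Int)) - 2 = ((j - 2 : Nat) : Int) := by omega
    have e1 : ((j : Int)) - 1 = ((j - 1 : Nat) : Int) := by omega
    unfold pvGrp pvSetAt
    rw [(by omega : 3 * ((j - 2) / 3) = j - 2),
       (by omega : j - 2 + 1 = j - 1), (by omega : j - 2 + 2 = j), e2, e1]
    simp [PySem.List.pyGetD_natCast, PySem.Str.toList_rstrip]
  · rw [if_pos (by simp; omega), if_neg h3]

-- generic index bookkeeping: summing over qualifying indices = summing over groups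
theorem pv_range_groups (n : Nat) (f : Nat → Int) :
    ((List.range n).map (fun j => if (j + 1) % 3 = 0 then f ((j - 2) / 3) else 0)).sum =
      ((List.range (n / 3)).map f).sum := by
  induction n with
  | zero => rfl
  | succ n ih =>
      rw [List.range_succ, List.map_append, List.sum_append, ih]
      by_cases h : (n + 1) % 3 = 0
      · have hn : (n + 1) / 3 = n / 3 + 1 := by omega
        have hk : (n - 2) / 3 = n / 3 := by omega
        rw [hn, List.range_succ, List.map_append, List.sum_append]
        simp [h, hk]
      · have hn : (n + 1) / 3 = n / 3 := by omega
        rw [hn]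
        simp [h]

-- B's per-index contribution, as the port computes it (Int index)
def pvGB (input : List String) (i : Int) : Int :=
  ((((PySem.List.slice input (some (i - 2)) (some (i + 1))).foldl
      (fun d line =>
        (PySem.Set.ofList (PySem.Str.rstrip line).toList).foldl
          (fun d c => d.insert c (d.getD c 0 + 1)) d)
      (PySem.Dict.empty : PySem.Dict Char Int)).items.filter
      (fun kv => kv.2 == 3)).map (fun kv => pvCalcPriority kv.1)).sum

theorem pv_BBody_eq (input : List String) (acc : Int) (i : Int) :
    pvBBody input acc i = acc + pvGB input i := by
  simp only [pvBBody, pvGB]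
  rw [PySem.List.foldl_if_eq_foldl_filter (fun kv : Char × Int => kv.2 == 3)
        (fun t kv => t + pvCalcPriority kv.1),
     PySem.List.foldl_add]

-- B as the same sum of per-triple contributions
theorem pv_B_eq (input : List String) :
    part2_alt input = ((List.range (input.length / 3)).map (pvGrp input)).sum := by
  unfold part2_alt
  rw [show pvBBody input = (fun acc i => acc + pvGB input i) from
        funext fun a => funext fun i => pv_BBody_eq input a i,
     PySem.List.foldl_add, zero_add,
     PySem.List.pyRange_of_pos 2 (input.length : Int) (by norm_num)]
  have hcount : (if (2 : Int) < (input.length : Int)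
      then (((input.length : Int) - 2 + 3 - 1) / 3).toNat else 0) = input.length / 3 := by
    split_ifs with h <;> omega
  rw [hcount, List.map_map]
  refine congrArg List.sum (List.map_congr_left ?_)
  intro k hk
  rw [List.mem_range] at hk
  have hb2 : 3 * k + 2 < input.length := by omega
  simp only [Function.comp, pvGB]
  have hi2 : (2 + 3 * (k : Int)) - 2 = ((3 * k : Nat) : Int) := by push_cast; ring
  have hi1 : (2 + 3 * (k : Int)) + 1 = ((3 * k : Nat) : Int) + ((3 : Nat) : Int) := by
    push_cast; ring
  rw [hi2, hi1, PySem.List.slice_natCast_add]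
  have hg : ∀ (i : Nat), i < input.length → input.getD i "" = input[i]! := fun i h => by
    rw [List.getD_eq_getElem?_getD, List.getElem?_eq_getElem h, List.getElem!_eq_getElem?_getD,
      List.getElem?_eq_getElem h]
    rfl
  have htake : List.take 3 (List.drop (3 * k) input) =
      [input.getD (3 * k) "", input.getD (3 * k + 1) "", input.getD (3 * k + 2) ""] := by
    rw [List.drop_eq_getElem_cons (by omega : 3 * k < input.length),
       List.drop_eq_getElem_cons (by omega : 3 * k + 1 < input.length),
       List.drop_eq_getElem_cons hb2,
       hg (3 * k) (by omega), hg (3 * k + 1) (by omega), hg (3 * k + 2) hb2]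
    simp only [List.take_succ_cons, List.take_zero, List.getElem!_eq_getElem?_getD,
      List.getElem?_eq_getElem, hb2, (by omega : 3 * k < input.length),
      (by omega : 3 * k + 1 < input.length), Option.getD_some]
  rw [htake, ← List.foldl_flatMap, PySem.Dict.foldl_insert_getD_add_one_eq_counter,
     PySem.Dict.items_counter, List.filter_map, List.map_map]
  simp only [List.flatMap_cons, List.flatMap_nil, List.append_nil, Function.comp_def,
    PySem.Str.toList_rstrip]
  have hpc : ∀ (c : Char) (L : List Char), (((List.count c L : Int)) == 3) = (L.count c == 3) := by
    intro c L
    by_cases h : L.count c = 3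
    · simp [h]
    · have h' : ((List.count c L : Int)) ≠ 3 := by omega
      simp [h, h']
  rw [List.filter_congr (fun c _ => hpc c _), pv_core _ _ _
      (PySem.Set.nodup_ofList _) (PySem.Set.nodup_ofList _) (PySem.Set.nodup_ofList _)]
  simp [pvGrp, pvSetAt]

-- ===== VERDICT (by name: the statement is the Claim_ definition above) =====
theorem part2_spec : Claim_equal_part2 := by
  intro input _
  unfold Spec_part2
  rw [pv_A_eq, pv_range_groups, pv_B_eq]
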